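-- pv_equiv track=rewrite | github.com/oulipoly/agent-software-developer-skill | scan/codemap/codemap_builder.py | _extract_codemap_fragment
-- ===== SOURCE A (Python) =====
-- def _extract_codemap_fragment(
--     codemap_text: str,
--     related_files: list[str],
-- ) -> str:
--     """Extract the portions of *codemap_text* relevant to *related_files*.
--
--     Scans each line of the codemap.  A line is included if any related-
--     file path appears in it (substring match).  Section headers (lines
--     starting with ``#``) are always included to preserve document
--     structure, but only if they precede at least one matched line.
--
--     Returns the assembled fragment text, or an empty string if nothing
--     matched.
--     """
--     if not related_files:
--         return ""
--
--     lines = codemap_text.splitlines(keepends=True)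
--     # Normalise related files for matching (strip leading ./ or /)
--     normalised = [_normalise_path(f) for f in related_files]
--
--     matched_indices: set[int] = set()
--     for i, line in enumerate(lines):
--         if any(norm in line for norm in normalised):
--             matched_indices.add(i)
--
--     if not matched_indices:
--         return ""
--
--     # Include section headers that precede matched content lines
--     result_indices: set[int] = set(matched_indices)
--     last_headers: list[int] = []
--     for i, line in enumerate(lines):
--         stripped = line.strip()
--         if stripped.startswith("#"):
--             last_headers = [i]
--         elif i in matched_indices:
--             result_indices.update(last_headers)
--
--     # Always include the first line if it's the document title
--     if lines and lines[0].strip().startswith("#"):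
--         result_indices.add(0)
--
--     return "".join(lines[i] for i in sorted(result_indices))
--
-- def _normalise_path(path: str) -> str:
--     """Strip leading ``./`` or ``/`` for substring matching."""
--     p = path.strip()
--     if p.startswith("./"):
--         p = p[2:]
--     elif p.startswith("/"):
--         p = p[1:]
--     return p
-- ===== SOURCE B (Python) =====
-- def _normalise_path(path: str) -> str:
--     """Strip leading ``./`` or ``/`` for substring matching."""
--     p = path.strip()
--     if p.startswith("./"):
--         p = p[2:]
--     elif p.startswith("/"):
--         p = p[1:]
--     return p
--
--
-- def _extract_codemap_fragment(
--     codemap_text: str,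
--     related_files: list[str],
-- ) -> str:
--     """Single fused pass: emit matched lines as they are seen, flushing the
--     most recent section header (kept pending) just before the first match it
--     governs; the title header (line 0) is emitted unconditionally.  No index
--     sets, no sorting, no second scan."""
--     if not related_files:
--         return ""
--     pats = [_normalise_path(f) for f in related_files]
--     out = []
--     pending = None
--     matched_any = False
--     for i, line in enumerate(codemap_text.splitlines(keepends=True)):
--         hit = any(p in line for p in pats)
--         matched_any = matched_any or hit
--         if line.strip().startswith("#"):
--             if i == 0 or hit:
--                 out.append(line)
--                 pending = None
--             else:
--                 pending = line
--         elif hit: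
--             if pending is not None:
--                 out.append(pending)
--                 pending = None
--             out.append(line)
--     return "".join(out) if matched_any else ""
-- ===== Notes on version B (the rewrite author's own statement) =====
-- stated objective: simpler
-- what changed: Replaces A's two index-collecting passes with set membership plus sort-and-reindex join by a single fused pass that emits lines in order, keeping only the latest unemitted header pending and flushing it right before the first matched line it governs; no index sets, no sorting, no second scan.
import Mathlib
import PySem

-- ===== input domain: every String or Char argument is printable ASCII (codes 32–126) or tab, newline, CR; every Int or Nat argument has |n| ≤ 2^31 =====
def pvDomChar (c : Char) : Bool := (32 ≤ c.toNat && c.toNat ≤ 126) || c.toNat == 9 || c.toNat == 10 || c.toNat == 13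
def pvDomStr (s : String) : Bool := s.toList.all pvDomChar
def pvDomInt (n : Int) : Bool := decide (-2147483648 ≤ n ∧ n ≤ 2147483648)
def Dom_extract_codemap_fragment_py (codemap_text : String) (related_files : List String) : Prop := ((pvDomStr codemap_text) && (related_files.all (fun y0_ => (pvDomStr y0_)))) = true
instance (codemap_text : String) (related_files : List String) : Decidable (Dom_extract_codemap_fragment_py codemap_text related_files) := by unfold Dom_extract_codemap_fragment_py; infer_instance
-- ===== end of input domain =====

-- B is a structurally different re-implementation: one fused pass emitting lines in order with a
-- pending-header flush, instead of A's two passes building index sets followed by sort-and-reindex.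

-- shared helpers (both Pythons call the same module helper `_normalise_path` and the same built-in idioms)

-- `_normalise_path` on char lists
def pvNorm (p : List Char) : List Char :=
  let q := PySem.Chars.strip p
  if PySem.Chars.startswith q ['.', '/'] then PySem.List.slice q (some 2) none
  else if PySem.Chars.startswith q ['/'] then PySem.List.slice q (some 1) none
  else q

-- `any(norm in line for norm in normalised)`
def pvHit (pats : List (List Char)) (l : List Char) : Bool := pats.any (fun p => PySem.Chars.isIn p l)

-- `line.strip().startswith("#")`
def pvIsHdr (l : List Char) : Bool := PySem.Chars.startswith (PySem.Chars.strip l) ['#']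

-- `codemap_text.splitlines(keepends=True)`: hand port (PySem.Str.splitlines drops the endings);
-- exact on the Dom alphabet, whose only line breaks are '\n', '\r' and the pair "\r\n".
def pvSplitKeepAux : List Char → List Char → List (List Char)
  | acc, [] => if acc = [] then [] else [acc.reverse]
  | acc, '\r' :: '\n' :: rest => (acc.reverse ++ ['\r', '\n']) :: pvSplitKeepAux [] rest
  | acc, '\n' :: rest => (acc.reverse ++ ['\n']) :: pvSplitKeepAux [] rest
  | acc, '\r' :: rest => (acc.reverse ++ ['\r']) :: pvSplitKeepAux [] rest
  | acc, c :: rest => pvSplitKeepAux (c :: acc) rest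

-- `enumerate(lines)` with Nat indices
def pvEnum : Nat → List (List Char) → List (Nat × List Char)
  | _, [] => []
  | i, l :: ls => (i, l) :: pvEnum (i + 1) ls

-- ===== PORT A =====
def extract_codemap_fragment_py (codemap_text : String) (related_files : List String) : String :=
  if related_files = [] then "" else
  let lines := pvSplitKeepAux [] codemap_text.toList
  let normalised := related_files.map (fun f => pvNorm f.toList)
  let matched : PySem.Set Nat :=
    (pvEnum 0 lines).foldl
      (fun s p => if pvHit normalised p.2 then PySem.Set.add s p.1 else s) PySem.Set.empty
  if matched = [] then "" else
  let st := (pvEnum 0 lines).foldl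
      (fun (st : PySem.Set Nat × List Nat) p =>
        if pvIsHdr p.2 then (st.1, [p.1])
        else if PySem.Set.contains matched p.1 then (PySem.Set.update st.1 st.2, st.2)
        else st)
      (PySem.Set.ofList matched, [])
  let result := match lines with
    | [] => st.1
    | l0 :: _ => if pvIsHdr l0 then PySem.Set.add st.1 0 else st.1
  String.ofList (PySem.Chars.join []
    ((PySem.List.sorted result (fun x => x) false).map (fun i => lines.getD i [])))

-- ===== PORT B =====
-- the fused single pass: pending = latest unemitted header, matched_any threaded
def pvAltLoop (pats : List (List Char)) : Option (List Char) → Bool → List (Nat × List Char) →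
    List (List Char) × Bool
  | _, ma, [] => ([], ma)
  | pend, ma, (i, l) :: rest =>
    let hit := pvHit pats l
    let ma' := ma || hit
    if pvIsHdr l then
      if i == 0 || hit then
        let r := pvAltLoop pats none ma' rest
        (l :: r.1, r.2)
      else pvAltLoop pats (some l) ma' rest
    else if hit then
      let r := pvAltLoop pats none ma' rest
      (pend.toList ++ l :: r.1, r.2)
    else pvAltLoop pats pend ma' rest

def extract_codemap_fragment_py_alt (codemap_text : String) (related_files : List String) : String :=
  if related_files = [] then "" else
  let pats := related_files.map (fun f => pvNorm f.toList)
  let r := pvAltLoop pats none false (pvEnum 0 (pvSplitKeepAux [] codemap_text.toList))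
  if r.2 then String.ofList (PySem.Chars.join [] r.1) else ""

-- ===== PRECONDITION & SPEC =====
def Spec_extract_codemap_fragment_py (codemap_text : String) (related_files : List String) (out : String) : Prop := out = extract_codemap_fragment_py_alt codemap_text related_files
instance (codemap_text : String) (related_files : List String) (out : String) : Decidable (Spec_extract_codemap_fragment_py codemap_text related_files out) := by unfold Spec_extract_codemap_fragment_py; infer_instance

-- ===== CLAIM (what is proved, stated in full; the proofs are below) =====
def Claim_equal_extract_codemap_fragment_py : Prop := ∀ (codemap_text : String) (related_files : List String), Dom_extract_codemap_fragment_py codemap_text related_files → Spec_extract_codemap_fragment_py codemap_text related_files (extract_codemap_fragment_py codemap_text related_files)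

-- ===== LEMMAS AND PROOFS =====

-- increasing list of indices of matching lines (what A's first fold collects)
def pvMsel (pats : List (List Char)) : Nat → List (List Char) → List Nat
  | _, [] => []
  | i, l :: r => (if pvHit pats l then [i] else []) ++ pvMsel pats (i + 1) r

-- "some matching non-header line occurs before the next header"
def pvAct (pats : List (List Char)) : List (List Char) → Bool
  | [] => false
  | l :: r => !pvIsHdr l && (pvHit pats l || pvAct pats r)

-- header indices activated by a later match (what A's second fold adds)
def pvHdrAct (pats : List (List Char)) : Nat → List (List Char) → Nat → Prop
  | _, [], _ => False
  | i, l :: r, x => (pvIsHdr l = true ∧ x = i ∧ pvAct pats r = true) ∨ pvHdrAct pats (i + 1) r x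

-- the emitted (index, line) pairs of B's fused pass
def pvInclP (pats : List (List Char)) : Option (Nat × List Char) → List (Nat × List Char) →
    List (Nat × List Char)
  | _, [] => []
  | pend, (i, l) :: rest =>
    if pvIsHdr l then
      if i == 0 || pvHit pats l then (i, l) :: pvInclP pats none rest
      else pvInclP pats (some (i, l)) rest
    else if pvHit pats l then pend.toList ++ (i, l) :: pvInclP pats none rest
    else pvInclP pats pend rest

-- membership spec of B's emitted indices
def pvQ (pats : List (List Char)) : Nat → List (List Char) → Nat → Prop
  | _, [], _ => False
  | i, l :: r, x =>
    (if pvIsHdr l = true then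
        (if i = 0 ∨ pvHit pats l = true then x = i else x = i ∧ pvAct pats r = true)
     else (pvHit pats l = true ∧ x = i)) ∨ pvQ pats (i + 1) r x

theorem pvAltLoop_eq_inclP (pats : List (List Char)) :
    ∀ (pairs : List (Nat × List Char)) (pend : Option (Nat × List Char)) (ma : Bool),
      pvAltLoop pats (pend.map Prod.snd) ma pairs =
        ((pvInclP pats pend pairs).map Prod.snd, ma || pairs.any (fun p => pvHit pats p.2)) := by
  intro pairs
  induction pairs with
  | nil => intro pend ma; simp [pvAltLoop, pvInclP]
  | cons p rest ih =>
    intro pend ma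
    obtain ⟨i, l⟩ := p
    simp only [pvAltLoop, pvInclP, List.any_cons]
    by_cases hh : pvIsHdr l
    · simp only [hh, if_true]
      by_cases hc : (i == 0 || pvHit pats l) = true
      · have := ih none (ma || pvHit pats l)
        simp only [Option.map_none] at this
        simp [hc, this, Bool.or_assoc]
      · have := ih (some (i, l)) (ma || pvHit pats l)
        simp only [Option.map_some] at this
        simp [hc, this, Bool.or_assoc]
    · simp only [hh, if_false, Bool.false_eq_true]
      by_cases hm : pvHit pats l
      · have := ih none (ma || pvHit pats l)
        simp only [Option.map_none, hm, Bool.or_true, Bool.true_or] at this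
        simp [hm, this, Option.toList_map]
      · have := ih pend (ma || pvHit pats l)
        simp only [hm, Bool.or_false] at this
        simp [hm, this]

theorem pvFold1_eq_msel (pats : List (List Char)) :
    ∀ (rest : List (List Char)) (i : Nat) (acc : PySem.Set Nat), (∀ x ∈ acc, x < i) →
      (pvEnum i rest).foldl
        (fun s p => if pvHit pats p.2 then PySem.Set.add s p.1 else s) acc
      = acc ++ pvMsel pats i rest := by
  intro rest
  induction rest with
  | nil => intro i acc h; simp [pvEnum, pvMsel]
  | cons l r ih =>
    intro i acc h
    simp only [pvEnum, pvMsel, List.foldl_cons]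
    by_cases hm : pvHit pats l
    · have hadd : PySem.Set.add acc i = acc ++ [i] := by
        unfold PySem.Set.add
        have hni : i ∉ acc := fun hc => absurd (h i hc) (by omega)
        simp [hni]
      rw [hm, if_pos rfl, hadd, ih (i+1) (acc ++ [i]) ?_]
      · simp
      · intro x hx
        rcases List.mem_append.1 hx with hx | hx
        · exact Nat.lt_succ_of_lt (h x hx)
        · simp at hx; omega
    · rw [if_neg (by simp [hm]), ih (i+1) acc (fun x hx => Nat.lt_succ_of_lt (h x hx))]
      simp [hm]

theorem pvMem_msel (pats : List (List Char)) :
    ∀ (L : List (List Char)) (i x : Nat),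
      x ∈ pvMsel pats i L ↔ ∃ k, k < L.length ∧ x = i + k ∧ pvHit pats (L.getD k []) = true := by
  intro L
  induction L with
  | nil => intro i x; simp [pvMsel]
  | cons l r ih =>
    intro i x
    simp only [pvMsel, List.mem_append]
    constructor
    · rintro (hx | hx)
      · by_cases hm : pvHit pats l
        · simp [hm] at hx
          exact ⟨0, by simp, by omega, by simpa [hx] using hm⟩
        · simp [hm] at hx
      · obtain ⟨k, hk, hxe, hh⟩ := (ih (i+1) x).1 hx
        exact ⟨k + 1, by simp; omega, by omega, by simpa using hh⟩
    · rintro ⟨k, hk, hxe, hh⟩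
      cases k with
      | zero =>
        left
        simp only [List.getD_cons_zero] at hh
        simp [hh]; omega
      | succ k =>
        right
        exact (ih (i+1) x).2 ⟨k, by simp at hk; omega, by omega, by simpa using hh⟩

theorem pvMsel_nil_iff (pats : List (List Char)) :
    ∀ (L : List (List Char)) (i : Nat),
      pvMsel pats i L = [] ↔ ∀ l ∈ L, pvHit pats l = false := by
  intro L
  induction L with
  | nil => intro i; simp [pvMsel]
  | cons l r ih =>
    intro i
    by_cases hm : pvHit pats l
    · simp [pvMsel, hm]
    · simp [pvMsel, hm, ih (i+1)]

theorem pvEnum_any (pats : List (List Char)) :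
    ∀ (L : List (List Char)) (i : Nat),
      (pvEnum i L).any (fun p => pvHit pats p.2) = L.any (fun l => pvHit pats l) := by
  intro L
  induction L with
  | nil => intro i; simp [pvEnum]
  | cons l r ih => intro i; simp [pvEnum, ih (i+1)]

theorem pvMem_enum :
    ∀ (L : List (List Char)) (i : Nat) (p : Nat × List Char),
      p ∈ pvEnum i L ↔ ∃ k, k < L.length ∧ p = (i + k, L.getD k []) := by
  intro L
  induction L with
  | nil => intro i p; simp [pvEnum]
  | cons l r ih =>
    intro i p
    simp only [pvEnum, List.mem_cons]
    constructor
    · rintro (rfl | hp)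
      · exact ⟨0, by simp⟩
      · obtain ⟨k, hk, rfl⟩ := (ih (i+1) p).1 hp
        exact ⟨k + 1, by simp; omega, by simp; omega⟩
    · rintro ⟨k, hk, rfl⟩
      cases k with
      | zero => left; simp
      | succ k =>
        right
        refine (ih (i+1) _).2 ⟨k, by simp at hk; omega, by simp; omega⟩

theorem pvFold2_spec (pats : List (List Char)) :
    ∀ (rest : List (List Char)) (i : Nat) (R : PySem.Set Nat) (lastH : List Nat), R.Nodup →
      (((pvEnum i rest).foldl
        (fun (st : PySem.Set Nat × List Nat) p =>
          if pvIsHdr p.2 then (st.1, [p.1])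
          else if pvHit pats p.2 then (PySem.Set.update st.1 st.2, st.2)
          else st) (R, lastH)).1.Nodup) ∧
      ∀ x, x ∈ ((pvEnum i rest).foldl
        (fun (st : PySem.Set Nat × List Nat) p =>
          if pvIsHdr p.2 then (st.1, [p.1])
          else if pvHit pats p.2 then (PySem.Set.update st.1 st.2, st.2)
          else st) (R, lastH)).1 ↔
        x ∈ R ∨ (x ∈ lastH ∧ pvAct pats rest = true) ∨ pvHdrAct pats i rest x := by
  intro rest
  induction rest with
  | nil =>
    intro i R lastH hR
    simp [pvEnum, pvAct, pvHdrAct, hR]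
  | cons l r ih =>
    intro i R lastH hR
    simp only [pvEnum, List.foldl_cons]
    by_cases hh : pvIsHdr l
    · simp only [hh, if_true]
      obtain ⟨h1, h2⟩ := ih (i + 1) R [i] hR
      refine ⟨h1, fun x => ?_⟩
      rw [h2 x]
      simp [pvAct, pvHdrAct, hh]
      try tauto
    · simp only [hh, Bool.false_eq_true, if_false]
      by_cases hm : pvHit pats l
      · simp only [hm, if_true]
        obtain ⟨h1, h2⟩ := ih (i + 1) (PySem.Set.update R lastH) lastH
          (PySem.Set.nodup_update R lastH hR)
        refine ⟨h1, fun x => ?_⟩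
        rw [h2 x]
        simp [pvAct, pvHdrAct, hh, hm, PySem.Set.mem_update]
        try tauto
      · simp only [hm, Bool.false_eq_true, if_false]
        obtain ⟨h1, h2⟩ := ih (i + 1) R lastH hR
        refine ⟨h1, fun x => ?_⟩
        rw [h2 x]
        simp [pvAct, pvHdrAct, hh, hm]

theorem pvMem_inclP (pats : List (List Char)) :
    ∀ (rest : List (List Char)) (i : Nat) (pend : Option (Nat × List Char)) (x : Nat),
      x ∈ (pvInclP pats pend (pvEnum i rest)).map Prod.fst ↔
        ((∃ h pl, pend = some (h, pl) ∧ x = h ∧ pvAct pats rest = true) ∨ pvQ pats i rest x) := by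
  intro rest
  induction rest with
  | nil => intro i pend x; simp [pvEnum, pvInclP, pvAct, pvQ]
  | cons l r ih =>
    intro i pend x
    simp only [pvEnum, pvInclP]
    by_cases hh : pvIsHdr l
    · simp only [hh, if_true]
      by_cases hc : (i == 0 || pvHit pats l) = true
      · rw [if_pos hc]
        simp only [List.map_cons, List.mem_cons, ih (i + 1) none x]
        simp only [beq_iff_eq, Bool.or_eq_true] at hc
        simp [pvAct, pvQ, hh, hc]
        try tauto
      · rw [if_neg hc]
        rw [ih (i + 1) (some (i, l)) x]
        simp only [beq_iff_eq, Bool.or_eq_true] at hc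
        rw [not_or] at hc
        simp [pvAct, pvQ, hh, hc.1, hc.2]
        try tauto
    · simp only [hh, Bool.false_eq_true, if_false]
      by_cases hm : pvHit pats l
      · simp only [hm, if_true]
        rcases pend with _ | ⟨h, pl⟩
        · simp only [Option.toList_none, List.nil_append, List.map_cons, List.mem_cons,
            ih (i + 1) none x]
          simp [pvAct, pvQ, hh, hm]
        · simp only [Option.toList_some, List.singleton_append, List.map_cons, List.mem_cons,
            ih (i + 1) none x]
          simp [pvAct, pvQ, hh, hm]
          try tauto
      · simp only [hm, Bool.false_eq_true, if_false]
        rw [ih (i + 1) pend x]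
        simp [pvAct, pvQ, hh, hm]

theorem pvQ_iff (pats : List (List Char)) :
    ∀ (L : List (List Char)) (i x : Nat),
      pvQ pats i L x ↔ x ∈ pvMsel pats i L ∨ pvHdrAct pats i L x ∨
        (i = 0 ∧ (∃ l0 r, L = l0 :: r ∧ pvIsHdr l0 = true) ∧ x = 0) := by
  intro L
  induction L with
  | nil => intro i x; simp [pvQ, pvMsel, pvHdrAct]
  | cons l r ih =>
    intro i x
    have hr := ih (i + 1) x
    simp only [pvQ, pvMsel, pvHdrAct, List.mem_append, hr]
    by_cases hh : pvIsHdr l <;> by_cases hi : i = 0 <;> by_cases hm : pvHit pats l <;>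
      simp [hh, hi, hm] <;> try tauto

def pvLB (pend : Option (Nat × List Char)) (i : Nat) : Nat :=
  match pend with | none => i | some (h, _) => h

theorem pvInclP_sorted (pats : List (List Char)) :
    ∀ (rest : List (List Char)) (i : Nat) (pend : Option (Nat × List Char)),
      (∀ h pl, pend = some (h, pl) → h < i) →
      ((pvInclP pats pend (pvEnum i rest)).map Prod.fst).Pairwise (· < ·) ∧
        ∀ x ∈ (pvInclP pats pend (pvEnum i rest)).map Prod.fst, pvLB pend i ≤ x := by
  intro rest
  induction rest with
  | nil =>
    intro i pend hp
    simp [pvEnum, pvInclP]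
  | cons l r ih =>
    intro i pend hp
    simp only [pvEnum, pvInclP]
    by_cases hh : pvIsHdr l
    · simp only [hh, if_true]
      by_cases hc : (i == 0 || pvHit pats l) = true
      · rw [if_pos hc]
        obtain ⟨hpw, hlb⟩ := ih (i + 1) none (by simp)
        simp only [pvLB] at hlb
        refine ⟨?_, ?_⟩
        · simp only [List.map_cons]
          exact List.pairwise_cons.2 ⟨fun y hy => by have := hlb y hy; omega, hpw⟩
        · intro x hx
          simp only [List.map_cons, List.mem_cons] at hx
          rcases pend with _ | ⟨h, pl⟩ <;> simp only [pvLB]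
          · rcases hx with rfl | hx
            · omega
            · have := hlb x hx; omega
          · have hhi := hp h pl rfl
            rcases hx with rfl | hx
            · omega
            · have := hlb x hx; omega
      · rw [if_neg hc]
        obtain ⟨hpw, hlb⟩ := ih (i + 1) (some (i, l)) (by rintro h' pl' he; cases he; omega)
        simp only [pvLB] at hlb
        refine ⟨hpw, fun x hx => ?_⟩
        have := hlb x hx
        rcases pend with _ | ⟨h, pl⟩ <;> simp only [pvLB]
        · omega
        · have := hp h pl rfl; omega
    · simp only [hh, Bool.false_eq_true, if_false]
      by_cases hm : pvHit pats l
      · rw [if_pos hm]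
        obtain ⟨hpw, hlb⟩ := ih (i + 1) none (by simp)
        simp only [pvLB] at hlb
        rcases pend with _ | ⟨h, pl⟩
        · refine ⟨?_, ?_⟩
          · simp only [Option.toList_none, List.nil_append, List.map_cons]
            exact List.pairwise_cons.2 ⟨fun y hy => by have := hlb y hy; omega, hpw⟩
          · intro x hx
            simp only [Option.toList_none, List.nil_append, List.map_cons, List.mem_cons] at hx
            simp only [pvLB]
            rcases hx with rfl | hx
            · omega
            · have := hlb x hx; omega
        · have hhi := hp h pl rfl
          refine ⟨?_, ?_⟩
          · simp only [Option.toList_some, List.singleton_append, List.map_cons]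
            refine List.pairwise_cons.2 ⟨?_, List.pairwise_cons.2 ⟨fun y hy => by have := hlb y hy; omega, hpw⟩⟩
            intro y hy
            simp only [List.mem_cons] at hy
            rcases hy with rfl | hy
            · omega
            · have := hlb y hy; omega
          · intro x hx
            simp only [Option.toList_some, List.singleton_append, List.map_cons, List.mem_cons] at hx
            simp only [pvLB]
            rcases hx with rfl | rfl | hx
            · omega
            · omega
            · have := hlb x hx; omega
      · rw [if_neg (by simpa using hm)]
        obtain ⟨hpw, hlb⟩ := ih (i + 1) pend
          (by intro h' pl' he; have := hp h' pl' he; omega)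
        refine ⟨hpw, fun x hx => ?_⟩
        have := hlb x hx
        rcases pend with _ | ⟨h, pl⟩ <;> simp only [pvLB] at this ⊢
        · omega
        · omega

theorem pvInclP_sub (pats : List (List Char)) :
    ∀ (pairs : List (Nat × List Char)) (pend : Option (Nat × List Char)) (p : Nat × List Char),
      p ∈ pvInclP pats pend pairs → p ∈ pend.toList ∨ p ∈ pairs := by
  intro pairs
  induction pairs with
  | nil => intro pend p hp; simp [pvInclP] at hp
  | cons q rest ih =>
    intro pend p hp
    obtain ⟨i, l⟩ := q
    simp only [pvInclP] at hp
    by_cases hh : pvIsHdr l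
    · rw [if_pos hh] at hp
      by_cases hc : (i == 0 || pvHit pats l) = true
      · rw [if_pos hc] at hp
        simp only [List.mem_cons] at hp
        rcases hp with rfl | hp
        · simp
        · rcases ih none p hp with h | h
          · simp at h
          · simp [h]
      · rw [if_neg hc] at hp
        rcases ih (some (i, l)) p hp with h | h
        · simp at h; simp [h]
        · simp [h]
    · rw [if_neg (by simpa using hh)] at hp
      by_cases hm : pvHit pats l
      · rw [if_pos hm] at hp
        simp only [List.mem_append, List.mem_cons] at hp
        rcases hp with hp | rfl | hp
        · exact Or.inl hp
        · simp
        · rcases ih none p hp with h | h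
          · simp at h
          · simp [h]
      · rw [if_neg (by simpa using hm)] at hp
        rcases ih pend p hp with h | h
        · exact Or.inl h
        · simp [h]

-- the whole pipeline equality on the split lines, for a nonempty pattern list result
set_option maxRecDepth 8192 in
theorem pvMain (pats : List (List Char)) (L : List (List Char)) :
    (if pvMsel pats 0 L = [] then ""
     else String.ofList (PySem.Chars.join []
       ((PySem.List.sorted
          (match L with
            | [] => (((pvEnum 0 L).foldl
                (fun (st : PySem.Set Nat × List Nat) p =>
                  if pvIsHdr p.2 then (st.1, [p.1])
                  else if PySem.Set.contains (pvMsel pats 0 L) p.1 then (PySem.Set.update st.1 st.2, st.2)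
                  else st) (PySem.Set.ofList (pvMsel pats 0 L), [])).1)
            | l0 :: _ =>
                if pvIsHdr l0 then
                  PySem.Set.add (((pvEnum 0 L).foldl
                    (fun (st : PySem.Set Nat × List Nat) p =>
                      if pvIsHdr p.2 then (st.1, [p.1])
                      else if PySem.Set.contains (pvMsel pats 0 L) p.1 then (PySem.Set.update st.1 st.2, st.2)
                      else st) (PySem.Set.ofList (pvMsel pats 0 L), [])).1) 0
                else (((pvEnum 0 L).foldl
                    (fun (st : PySem.Set Nat × List Nat) p =>
                      if pvIsHdr p.2 then (st.1, [p.1])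
                      else if PySem.Set.contains (pvMsel pats 0 L) p.1 then (PySem.Set.update st.1 st.2, st.2)
                      else st) (PySem.Set.ofList (pvMsel pats 0 L), [])).1))
          (fun x => x) false).map (fun i => L.getD i []))))
    = (if L.any (fun l => pvHit pats l) then
         String.ofList (PySem.Chars.join [] ((pvInclP pats none (pvEnum 0 L)).map Prod.snd))
       else "") := by
  by_cases hAny : L.any (fun l => pvHit pats l)
  · have hMne : pvMsel pats 0 L ≠ [] := by
      intro h
      obtain ⟨l, hl, hlh⟩ := List.any_eq_true.1 hAny
      have := (pvMsel_nil_iff pats L 0).1 h l hl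
      simp [this] at hlh
    rw [if_neg hMne, if_pos hAny]
    rcases L with _ | ⟨l0, r0⟩
    · simp at hAny
    -- replace the contains-test by the hit-test
    have hcong : ((pvEnum 0 (l0 :: r0)).foldl
        (fun (st : PySem.Set Nat × List Nat) p =>
          if pvIsHdr p.2 then (st.1, [p.1])
          else if PySem.Set.contains (pvMsel pats 0 (l0 :: r0)) p.1 then (PySem.Set.update st.1 st.2, st.2)
          else st) (PySem.Set.ofList (pvMsel pats 0 (l0 :: r0)), []))
      = ((pvEnum 0 (l0 :: r0)).foldl
        (fun (st : PySem.Set Nat × List Nat) p =>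
          if pvIsHdr p.2 then (st.1, [p.1])
          else if pvHit pats p.2 then (PySem.Set.update st.1 st.2, st.2)
          else st) (PySem.Set.ofList (pvMsel pats 0 (l0 :: r0)), [])) := by
      apply PySem.List.foldl_congr_mem
      intro acc p hp
      obtain ⟨k, hk, rfl⟩ := (pvMem_enum (l0 :: r0) 0 p).1 hp
      by_cases hh : pvIsHdr ((l0 :: r0).getD k [])
      · have hh' : pvIsHdr ((l0 :: r0)[k]?.getD []) = true := hh
        simp [hh']
      · have hh' : pvIsHdr ((l0 :: r0)[k]?.getD []) = false := by
          simpa using hh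
        by_cases hhit : pvHit pats ((l0 :: r0).getD k [])
        · have hhit' : pvHit pats ((l0 :: r0)[k]?.getD []) = true := hhit
          have hkm : k ∈ pvMsel pats 0 (l0 :: r0) :=
            (pvMem_msel pats (l0 :: r0) 0 k).2 ⟨k, hk, by omega, hhit⟩
          simp [hh', hhit', hkm]
        · have hhit' : pvHit pats ((l0 :: r0)[k]?.getD []) = false := by
            simpa using hhit
          have hkm : k ∉ pvMsel pats 0 (l0 :: r0) := by
            intro hmem
            obtain ⟨k', hk', he, hh2⟩ := (pvMem_msel pats (l0 :: r0) 0 _).1 hmem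
            have : k' = k := by omega
            subst this
            exact absurd hh2 (by simpa using hhit)
          simp [hh', hhit', hkm]
    obtain ⟨hnd, hmemF⟩ := pvFold2_spec pats (l0 :: r0) 0
      (PySem.Set.ofList (pvMsel pats 0 (l0 :: r0))) [] (PySem.Set.nodup_ofList _)
    rw [hcong]
    -- the result set (with a possible title add) and its membership / nodup facts
    set F := ((pvEnum 0 (l0 :: r0)).foldl
        (fun (st : PySem.Set Nat × List Nat) p =>
          if pvIsHdr p.2 then (st.1, [p.1])
          else if pvHit pats p.2 then (PySem.Set.update st.1 st.2, st.2)
          else st) (PySem.Set.ofList (pvMsel pats 0 (l0 :: r0)), [])).1 with hF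
    have hmemF' : ∀ x, x ∈ F ↔ x ∈ pvMsel pats 0 (l0 :: r0) ∨ pvHdrAct pats 0 (l0 :: r0) x := by
      intro x
      rw [hmemF x]
      simp [PySem.Set.mem_ofList]
    set result := (if pvIsHdr l0 then PySem.Set.add F 0 else F) with hresult
    have hndR : result.Nodup := by
      rw [hresult]
      split
      · exact PySem.Set.nodup_add F 0 hnd
      · exact hnd
    have hmemR : ∀ x, x ∈ result ↔ x ∈ pvMsel pats 0 (l0 :: r0) ∨ pvHdrAct pats 0 (l0 :: r0) x ∨
        (pvIsHdr l0 = true ∧ x = 0) := by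
      intro x
      rw [hresult]
      by_cases hh : pvIsHdr l0
      · rw [if_pos hh, PySem.Set.mem_add, hmemF' x]
        simp [hh]
        tauto
      · rw [if_neg hh, hmemF' x]
        simp [hh]
    -- the emitted index list of B and its properties
    set I := pvInclP pats none (pvEnum 0 (l0 :: r0)) with hI
    have hmemI : ∀ x, x ∈ I.map Prod.fst ↔ x ∈ pvMsel pats 0 (l0 :: r0) ∨
        pvHdrAct pats 0 (l0 :: r0) x ∨ (pvIsHdr l0 = true ∧ x = 0) := by
      intro x
      rw [hI, pvMem_inclP pats (l0 :: r0) 0 none x, pvQ_iff pats (l0 :: r0) 0 x]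
      constructor
      · rintro (⟨h, pl, he, _⟩ | h | h | ⟨_, ⟨l0', r', he, hh⟩, hx⟩)
        · cases he
        · tauto
        · tauto
        · cases he; exact Or.inr (Or.inr ⟨hh, hx⟩)
      · rintro (h | h | ⟨hh, hx⟩)
        · tauto
        · tauto
        · exact Or.inr (Or.inr (Or.inr ⟨rfl, ⟨l0, r0, rfl, hh⟩, hx⟩))
    obtain ⟨hpwI, _⟩ := pvInclP_sorted pats (l0 :: r0) 0 none (by intro h pl he; cases he)
    have hndI : (I.map Prod.fst).Nodup := hpwI.imp (fun h => Nat.ne_of_lt h)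
    have hperm : (I.map Prod.fst).Perm result := by
      rw [List.perm_ext_iff_of_nodup hndI hndR]
      intro a
      rw [hmemI a, hmemR a]
    have hsorted : PySem.List.sorted result (fun x => x) false = I.map Prod.fst :=
      PySem.List.sorted_eq_of_perm_of_pairwise_lt result (I.map Prod.fst) (fun x => x) hperm hpwI
    rw [hsorted]
    -- reindexing through the lines gives back the emitted lines
    have hmap : (I.map Prod.fst).map (fun i => (l0 :: r0).getD i []) = I.map Prod.snd := by
      rw [List.map_map]
      apply List.map_congr_left
      intro p hpI
      rcases pvInclP_sub pats (pvEnum 0 (l0 :: r0)) none p hpI with h | h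
      · simp at h
      · obtain ⟨k, hk, rfl⟩ := (pvMem_enum (l0 :: r0) 0 p).1 h
        simp
    rw [hmap]
  · have hM : pvMsel pats 0 L = [] := by
      rw [pvMsel_nil_iff]
      intro l hl
      by_contra hc
      exact hAny (List.any_eq_true.2 ⟨l, hl, by simpa using hc⟩)
    rw [if_pos hM, if_neg hAny]

-- ===== VERDICT (by name: the statement is the Claim_ definition above) =====
set_option maxRecDepth 8192 in
theorem extract_codemap_fragment_py_spec : Claim_equal_extract_codemap_fragment_py := by
  unfold Claim_equal_extract_codemap_fragment_py
  intro codemap_text related_files _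
  unfold Spec_extract_codemap_fragment_py
  unfold extract_codemap_fragment_py extract_codemap_fragment_py_alt
  by_cases hrf : related_files = []
  · simp [hrf]
  · rw [if_neg hrf, if_neg hrf]
    have hM := pvFold1_eq_msel (related_files.map (fun f => pvNorm f.toList))
      (pvSplitKeepAux [] codemap_text.toList) 0 PySem.Set.empty (by intro x hx; cases hx)
    have hB := pvAltLoop_eq_inclP (related_files.map (fun f => pvNorm f.toList))
      (pvEnum 0 (pvSplitKeepAux [] codemap_text.toList)) none false
    simp only [Option.map_none] at hB
    simp only [PySem.Set.empty, List.nil_append] at hM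
    simp only [hM, hB, PySem.Set.empty, Bool.false_or,
      pvEnum_any (related_files.map (fun f => pvNorm f.toList)) (pvSplitKeepAux [] codemap_text.toList) 0]
    exact pvMain (related_files.map (fun f => pvNorm f.toList)) (pvSplitKeepAux [] codemap_text.toList)
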